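-- pv_equiv track=rewrite | github.com/robertbyers1111/python | MORE_PYTHON_STUFF/HackerRank/hackerrank.py | birthdayCakeCandles
-- ===== SOURCE A (Python) =====
-- def birthdayCakeCandles(n, ar):
--
--     canblow=0
--
--     max=0
--     for i in ar:
--         if (i>max):
--             max=i
--
--     for i in ar:
--         if (i==max):
--             canblow+=1
--
--     return(canblow)
-- ===== SOURCE B (Python) =====
-- def birthdayCakeCandles(n, ar):
--     mx = 0
--     canblow = 0
--     for i in ar:
--         if i > mx:
--             mx = i
--             canblow = 1
--         elif i == mx:
--             canblow += 1
--     return canblow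
-- ===== Notes on version B (the rewrite author's own statement) =====
-- stated objective: alternative
-- what changed: B fuses A's two scans (find max, then count max) into one pass that maintains the running maximum together with its count, resetting the count to 1 whenever a strictly larger element appears.
import Mathlib
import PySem

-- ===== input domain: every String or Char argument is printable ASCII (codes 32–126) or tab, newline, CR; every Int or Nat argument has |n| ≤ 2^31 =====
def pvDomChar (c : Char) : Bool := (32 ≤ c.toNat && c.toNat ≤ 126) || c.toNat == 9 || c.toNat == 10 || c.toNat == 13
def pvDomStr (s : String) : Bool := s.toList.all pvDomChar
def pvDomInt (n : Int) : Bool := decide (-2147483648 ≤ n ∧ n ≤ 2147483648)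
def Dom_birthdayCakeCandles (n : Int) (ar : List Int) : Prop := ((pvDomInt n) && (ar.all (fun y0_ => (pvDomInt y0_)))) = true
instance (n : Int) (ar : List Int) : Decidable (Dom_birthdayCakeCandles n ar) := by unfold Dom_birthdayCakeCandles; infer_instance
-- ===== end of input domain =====

-- B fuses A's two scans (find max, then count max) into one pass maintaining the running
-- maximum together with its count (objective: alternative one-pass decomposition).

-- ===== PORT A =====
def birthdayCakeCandles (n : Int) (ar : List Int) : Int :=
  let max := ar.foldl (fun m i => if i > m then i else m) 0
  ar.foldl (fun canblow i => if i = max then canblow + 1 else canblow) 0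

-- ===== PORT B =====
def birthdayCakeCandles_alt (n : Int) (ar : List Int) : Int :=
  (ar.foldl (fun (s : Int × Int) i =>
      if i > s.1 then (i, 1)
      else if i = s.1 then (s.1, s.2 + 1)
      else s) (0, 0)).2

-- ===== PRECONDITION & SPEC =====
def Spec_birthdayCakeCandles (n : Int) (ar : List Int) (out : Int) : Prop := out = birthdayCakeCandles_alt n ar
instance (n : Int) (ar : List Int) (out : Int) : Decidable (Spec_birthdayCakeCandles n ar out) := by unfold Spec_birthdayCakeCandles; infer_instance

-- ===== CLAIM (what is proved, stated in full; the proofs are below) =====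
def Claim_equal_birthdayCakeCandles : Prop := ∀ (n : Int) (ar : List Int), Dom_birthdayCakeCandles n ar → Spec_birthdayCakeCandles n ar (birthdayCakeCandles n ar)

-- ===== LEMMAS AND PROOFS =====

-- A's first loop produces a value ≥ its accumulator.
theorem pv_maxfold_ge (ar : List Int) (m : Int) :
    m ≤ ar.foldl (fun m i => if i > m then i else m) m := by
  induction ar generalizing m with
  | nil => simp
  | cons i t ih =>
    simp only [List.foldl_cons]
    split_ifs with h
    · exact le_of_lt (lt_of_lt_of_le h (ih i))
    · exact ih m

-- A's count loop is the accumulator plus List.count.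
theorem pv_countfold (ar : List Int) (M c : Int) :
    ar.foldl (fun canblow i => if i = M then canblow + 1 else canblow) c
      = c + (ar.count M : Int) := by
  induction ar generalizing c with
  | nil => simp
  | cons i t ih =>
    simp only [List.foldl_cons, List.count_cons]
    by_cases h : i = M
    · simp [h, ih]; ring
    · simp [h, ih]

-- B's fused loop, characterised: its count is c plus the count of m if no larger
-- element appears, else the count of the new maximum in the whole list.
theorem pv_blow (ar : List Int) (m c : Int) :
    (ar.foldl (fun (s : Int × Int) i =>
        if i > s.1 then (i, 1)
        else if i = s.1 then (s.1, s.2 + 1)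
        else s) (m, c)).2
      = if ar.foldl (fun m i => if i > m then i else m) m = m
          then c + (ar.count m : Int)
          else (ar.count (ar.foldl (fun m i => if i > m then i else m) m) : Int) := by
  induction ar generalizing m c with
  | nil => simp
  | cons i t ih =>
    simp only [List.foldl_cons]
    by_cases hgt : i > m
    · simp only [if_pos hgt, ih]
      have hge : i ≤ t.foldl (fun m i => if i > m then i else m) i := pv_maxfold_ge t i
      have hne : t.foldl (fun m i => if i > m then i else m) i ≠ m := by
        intro h; rw [h] at hge; exact absurd hgt (not_lt.mpr hge)
      rw [if_neg hne]
      by_cases heq : t.foldl (fun m i => if i > m then i else m) i = i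
      · rw [if_pos heq, heq, List.count_cons_self]; push_cast; ring
      · have : ¬ (i == t.foldl (fun m i => if i > m then i else m) i) := by
          simpa using fun h => heq h.symm
        rw [if_neg heq, List.count_cons, if_neg this]; simp
    · simp only [if_neg hgt]
      by_cases heq : i = m
      · simp only [if_pos heq, ih]
        subst heq
        by_cases hM : t.foldl (fun m i => if i > m then i else m) i = i
        · rw [if_pos hM, if_pos hM, List.count_cons_self]; push_cast; ring
        · have : ¬ (i == t.foldl (fun m i => if i > m then i else m) i) := by
            simpa using fun h => hM h.symm
          rw [if_neg hM, if_neg hM, List.count_cons, if_neg this]; simp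
      · simp only [if_neg heq, ih]
        have hlt : i < m := lt_of_le_of_ne (not_lt.mp hgt) heq
        by_cases hM : t.foldl (fun m i => if i > m then i else m) m = m
        · have : ¬ (i == m) := by simpa using heq
          rw [if_pos hM, if_pos hM, List.count_cons, if_neg this]; simp
        · have hge : m ≤ t.foldl (fun m i => if i > m then i else m) m := pv_maxfold_ge t m
          have : ¬ (i == t.foldl (fun m i => if i > m then i else m) m) := by
            simp only [beq_iff_eq]
            intro h; rw [← h] at hge; exact absurd (lt_of_lt_of_le hlt hge) (lt_irrefl i)
          rw [if_neg hM, if_neg hM, List.count_cons, if_neg this]; simp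

-- ===== VERDICT (by name: the statement is the Claim_ definition above) =====
theorem birthdayCakeCandles_spec : Claim_equal_birthdayCakeCandles := by
  intro n ar _
  unfold Spec_birthdayCakeCandles birthdayCakeCandles birthdayCakeCandles_alt
  rw [pv_blow, pv_countfold]
  by_cases hM : ar.foldl (fun m i => if i > m then i else m) 0 = 0
  · rw [if_pos hM, hM]
  · rw [if_neg hM]; ring
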